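-- pv_equiv track=rewrite | github.com/alago1/aoc-2023 | day18/18.py | get_dims
-- ===== SOURCE A (Python) =====
-- def get_dims(instructions):
--     max_x, max_y = 0, 0
--     min_x, min_y = 0, 0
--
--     x, y = 0, 0
--
--     for inst in instructions:
--         if inst[0] in 'LR':
--             x += inst[1] * (-1 if inst[0] == 'L' else 1)
--
--         if inst[0] in 'UD':
--             y += inst[1] * (-1 if inst[0] == 'D' else 1)
--
--         max_x = max(max_x, x)
--         max_y = max(max_y, y)
--         min_x = min(min_x, x)
--         min_y = min(min_y, y)
--
--     dimensions = (max_y - min_y + 1, max_x - min_x + 1, )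
--     origin = (-min_y, -min_x)
--
--     return dimensions, origin
-- ===== SOURCE B (Python) =====
-- def _axis_positions(instructions, axis, neg):
--     pos = [0]
--     for s, d in instructions:
--         if s in axis:
--             pos.append(pos[-1] + (-d if s == neg else d))
--     return pos
--
--
-- def get_dims(instructions):
--     xs = _axis_positions(instructions, 'LR', 'L')
--     ys = _axis_positions(instructions, 'UD', 'D')
--     max_x, min_x = max(xs), min(xs)
--     max_y, min_y = max(ys), min(ys)
--     return (max_y - min_y + 1, max_x - min_x + 1), (-min_y, -min_x)
-- ===== Notes on version B (the rewrite author's own statement) =====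
-- stated objective: alternative
-- what changed: Replaced the fused single pass that updates four running bounds with a build-then-reduce decomposition: per axis, accumulate the list of visited positions (starting from 0), then take max/min of each list.
import Mathlib
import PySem

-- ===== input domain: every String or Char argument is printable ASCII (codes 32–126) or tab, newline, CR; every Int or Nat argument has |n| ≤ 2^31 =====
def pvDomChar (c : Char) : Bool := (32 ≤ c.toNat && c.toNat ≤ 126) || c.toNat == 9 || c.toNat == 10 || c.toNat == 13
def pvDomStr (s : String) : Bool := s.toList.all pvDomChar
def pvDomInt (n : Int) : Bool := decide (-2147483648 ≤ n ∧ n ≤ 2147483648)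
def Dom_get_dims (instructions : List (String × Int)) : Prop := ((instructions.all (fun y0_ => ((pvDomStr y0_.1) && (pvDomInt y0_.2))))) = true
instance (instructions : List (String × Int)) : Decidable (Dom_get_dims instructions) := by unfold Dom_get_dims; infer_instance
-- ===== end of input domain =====

-- B replaces A's fused four-bound single pass with a per-axis build-then-reduce decomposition (alternative, same cost).

-- ===== PORT A =====
-- loop body of A's single pass; state = (max_x, max_y, min_x, min_y, x, y)
def pvStepA (st : Int × Int × Int × Int × Int × Int) (inst : String × Int) :
    Int × Int × Int × Int × Int × Int :=
  match st with
  | (max_x, max_y, min_x, min_y, x, y) =>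
    let x := if PySem.Str.isIn inst.1 "LR" then x + inst.2 * (if inst.1 == "L" then -1 else 1) else x
    let y := if PySem.Str.isIn inst.1 "UD" then y + inst.2 * (if inst.1 == "D" then -1 else 1) else y
    (max max_x x, max max_y y, min min_x x, min min_y y, x, y)

def get_dims (instructions : List (String × Int)) : (Int × Int) × (Int × Int) :=
  match instructions.foldl pvStepA (0, 0, 0, 0, 0, 0) with
  | (max_x, max_y, min_x, min_y, _, _) =>
    ((max_y - min_y + 1, max_x - min_x + 1), (-min_y, -min_x))

-- ===== PORT B =====
-- _axis_positions' append loop as the obvious structural recursion carrying pos[-1];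
-- the initial element 0 is consed on by the caller.
def pvAxisTail (axis neg : String) (cur : Int) : List (String × Int) → List Int
  | [] => []
  | (s, d) :: t =>
      if PySem.Str.isIn s axis then
        let nxt := cur + (if s == neg then -d else d)
        nxt :: pvAxisTail axis neg nxt t
      else pvAxisTail axis neg cur t

def get_dims_alt (instructions : List (String × Int)) : (Int × Int) × (Int × Int) :=
  let xs := 0 :: pvAxisTail "LR" "L" 0 instructions
  let ys := 0 :: pvAxisTail "UD" "D" 0 instructions
  let max_x := (PySem.List.max? xs (fun v => v)).getD 0
  let min_x := (PySem.List.min? xs (fun v => v)).getD 0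
  let max_y := (PySem.List.max? ys (fun v => v)).getD 0
  let min_y := (PySem.List.min? ys (fun v => v)).getD 0
  ((max_y - min_y + 1, max_x - min_x + 1), (-min_y, -min_x))

-- ===== PRECONDITION & SPEC =====
def Spec_get_dims (instructions : List (String × Int)) (out : (Int × Int) × (Int × Int)) : Prop := out = get_dims_alt instructions
instance (instructions : List (String × Int)) (out : (Int × Int) × (Int × Int)) : Decidable (Spec_get_dims instructions out) := by unfold Spec_get_dims; infer_instance

-- ===== CLAIM (what is proved, stated in full; the proofs are below) =====
def Claim_equal_get_dims : Prop := ∀ (instructions : List (String × Int)), Dom_get_dims instructions → Spec_get_dims instructions (get_dims instructions)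

-- ===== LEMMAS AND PROOFS =====

-- A's loop, started from a state whose bounds already cover (x, y), computes exactly the
-- fold of max/min over the position tails that B builds (final x, y existentially hidden).
lemma pvLoopA (l : List (String × Int)) :
    ∀ (mx my nx ny x y : Int), x ≤ mx → nx ≤ x → y ≤ my → ny ≤ y →
      ∃ fx fy, l.foldl pvStepA (mx, my, nx, ny, x, y) =
        ((pvAxisTail "LR" "L" x l).foldl max mx,
         (pvAxisTail "UD" "D" y l).foldl max my,
         (pvAxisTail "LR" "L" x l).foldl min nx,
         (pvAxisTail "UD" "D" y l).foldl min ny, fx, fy) := by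
  induction l with
  | nil => intro mx my nx ny x y _ _ _ _; exact ⟨x, y, rfl⟩
  | cons hd t ih =>
    obtain ⟨s, d⟩ := hd
    intro mx my nx ny x y hmx hnx hmy hny
    have hx : (if PySem.Str.isIn s "LR" then x + d * (if s == "L" then -1 else 1) else x)
        = (if PySem.Str.isIn s "LR" then x + (if s == "L" then -d else d) else x) := by
      split_ifs <;> ring
    have hy : (if PySem.Str.isIn s "UD" then y + d * (if s == "D" then -1 else 1) else y)
        = (if PySem.Str.isIn s "UD" then y + (if s == "D" then -d else d) else y) := by
      split_ifs <;> ring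
    simp only [List.foldl_cons, pvStepA, hx, hy]
    by_cases hLR : PySem.Str.isIn s "LR" = true <;>
      by_cases hUD : PySem.Str.isIn s "UD" = true <;>
        simp only [pvAxisTail, hLR, hUD, if_true, Bool.false_eq_true, if_false, List.foldl_cons] <;>
        first
          | exact ih _ _ _ _ _ _ (le_max_right _ _) (min_le_right _ _)
              (le_max_right _ _) (min_le_right _ _)
          | (rw [max_eq_left hmy, min_eq_left hny];
             exact ih _ _ _ _ _ _ (le_max_right _ _) (min_le_right _ _) hmy hny)
          | (rw [max_eq_left hmx, min_eq_left hnx];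
             exact ih _ _ _ _ _ _ hmx hnx (le_max_right _ _) (min_le_right _ _))
          | (rw [max_eq_left hmx, min_eq_left hnx, max_eq_left hmy, min_eq_left hny];
             exact ih _ _ _ _ _ _ hmx hnx hmy hny)

-- ===== VERDICT (by name: the statement is the Claim_ definition above) =====
theorem get_dims_spec : Claim_equal_get_dims := by
  intro instructions _
  unfold Spec_get_dims get_dims get_dims_alt
  obtain ⟨fx, fy, h⟩ := pvLoopA instructions 0 0 0 0 0 0 le_rfl le_rfl le_rfl le_rfl
  rw [h]
  simp only [PySem.List.max?_id_cons, PySem.List.min?_id_cons, Option.getD_some]
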